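-- pv_equiv track=rewrite | github.com/rodrigogiraoserrao/Advent-of-Code | 2025/11.py | compute_reachable
-- ===== SOURCE A (Python) =====
-- def compute_reachable(start: str, connections: dict[str, set[str]]) -> set[str]:
--     """Find all reachable vertices from the given starting point."""
--
--     queued: set[str] = {start}
--     reachable: set[str] = {start}
--     while queued:
--         this = queued.pop()
--         new_reachable = connections[this] - reachable
--         queued.update(new_reachable)
--         reachable.update(new_reachable)
--
--     return reachable
-- ===== SOURCE B (Python) =====
-- def compute_reachable(start: str, connections: dict[str, set[str]]) -> set[str]:
--     """Find all reachable vertices from the given starting point."""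
--
--     reachable: set[str] = {start}
--     changed = True
--     while changed:
--         changed = False
--         for vertex in list(reachable):
--             for neighbour in connections[vertex]:
--                 if neighbour not in reachable:
--                     reachable.add(neighbour)
--                     changed = True
--     return reachable
-- ===== Notes on version B (the rewrite author's own statement) =====
-- stated objective: alternative
-- what changed: Replaces A's worklist search (pop one pending vertex from a queued set, bulk set-difference its neighbours in) by a fixpoint iteration with no worklist at all: repeatedly re-scan the entire current reachable set, absorbing each member's neighbours one by one, until one full pass adds nothing.
import Mathlib
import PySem

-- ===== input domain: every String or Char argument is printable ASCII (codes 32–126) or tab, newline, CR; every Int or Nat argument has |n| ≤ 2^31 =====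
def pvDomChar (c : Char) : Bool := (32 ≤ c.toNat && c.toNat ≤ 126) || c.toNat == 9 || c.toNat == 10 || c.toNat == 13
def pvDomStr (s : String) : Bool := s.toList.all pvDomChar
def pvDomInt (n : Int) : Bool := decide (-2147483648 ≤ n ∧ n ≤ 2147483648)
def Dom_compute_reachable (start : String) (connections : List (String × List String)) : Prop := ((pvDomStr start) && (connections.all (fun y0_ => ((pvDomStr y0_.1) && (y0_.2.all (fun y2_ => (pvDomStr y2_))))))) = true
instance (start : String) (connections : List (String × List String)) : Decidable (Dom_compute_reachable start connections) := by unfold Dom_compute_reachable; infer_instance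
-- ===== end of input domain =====

-- B replaces A's worklist search (pop a queued vertex, set-difference its neighbours in) by a
-- fixpoint iteration with no worklist: re-scan the whole current reachable set until a full
-- pass adds nothing (alternative algorithm, not claimed faster).  Both Pythons return a SET of
-- strings, which has no order: each port returns the canonical sorted list representing it.

-- ===== PORT A =====
-- helpers for the termination measure of A's while-loop
def pvAllNodes (c : List (String × List String)) : List String := (c.map Prod.snd).flatten

def pvUndisc (c : List (String × List String)) (r : List String) : Nat :=
  ((pvAllNodes c).filter (fun x => !(r.contains x))).length

def pvK (c : List (String × List String)) : Nat := (pvAllNodes c).length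

theorem pv_get_mem_values (c : List (String × List String)) (v : String) (vs : List String)
    (h : PySem.Dict.get? (PySem.Dict.mk c) v = some vs) : vs ∈ c.map Prod.snd := by
  induction c with
  | nil => simp [PySem.Dict.get?] at h
  | cons p rest ih =>
    rw [show (PySem.Dict.mk (p :: rest)) = PySem.Dict.mk ((p.1, p.2) :: rest) by rfl] at h
    rw [PySem.Dict.get?_mk_cons] at h
    by_cases hp : p.1 == v
    · simp [hp] at h; simp [← h]
    · simp [hp] at h; exact List.mem_cons_of_mem _ (ih h)

theorem pv_vs_len_le (c : List (String × List String)) (vs : List String)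
    (h : vs ∈ c.map Prod.snd) : vs.length ≤ pvK c := by
  have : List.Sublist vs (pvAllNodes c) := List.sublist_flatten_of_mem h
  exact this.length_le

theorem pv_mem_allNodes (c : List (String × List String)) (vs : List String) (x : String)
    (h : vs ∈ c.map Prod.snd) (hx : x ∈ vs) : x ∈ pvAllNodes c := by
  exact List.mem_flatten.2 ⟨vs, h, hx⟩

theorem pv_undisc_lt (c : List (String × List String)) (r n : List String) (x : String)
    (hxn : x ∈ n) (hxa : x ∈ pvAllNodes c) (hxr : x ∉ r) :
    pvUndisc c (r ++ n) < pvUndisc c r := by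
  unfold pvUndisc
  have hsub : List.Sublist ((pvAllNodes c).filter (fun y => !((r ++ n).contains y)))
      ((pvAllNodes c).filter (fun y => !(r.contains y))) := by
    refine List.monotone_filter_right _ ?_
    intro a ha
    simp only [Bool.not_eq_true', List.contains_eq_mem, decide_eq_false_iff_not] at ha ⊢
    intro hm; exact ha (List.mem_append.2 (Or.inl hm))
  refine Nat.lt_of_le_of_ne hsub.length_le ?_
  intro heq
  have heq' := hsub.eq_of_length heq
  have hx1 : x ∈ (pvAllNodes c).filter (fun y => !(r.contains y)) := by
    simp [List.mem_filter, hxa, hxr]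
  rw [← heq'] at hx1
  have := (List.mem_filter.1 hx1).2
  simp [List.contains_eq_mem] at this
  exact this.2 hxn

-- A's while-loop: pop the head of the queued set, add the unseen neighbours to both sets.
def pvLoopA (c : List (String × List String)) : List String → List String → List String
  | [], r => r
  | v :: q, r =>
    match hv : PySem.Dict.get? (PySem.Dict.mk c) v with
    | none => r    -- Python raises KeyError here (excluded by Pre_)
    | some vs =>
      pvLoopA c (PySem.Set.update q (PySem.Set.diff (PySem.Set.ofList vs) r))
                (PySem.Set.update r (PySem.Set.diff (PySem.Set.ofList vs) r))
  termination_by q r => (pvK c + 1) * pvUndisc c r + q.length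
  decreasing_by
    have hnodup : (PySem.Set.diff (PySem.Set.ofList vs) r).Nodup :=
      PySem.Set.nodup_diff _ _ (PySem.Set.nodup_ofList vs)
    have hdisr : ∀ x ∈ PySem.Set.diff (PySem.Set.ofList vs) r, x ∉ r :=
      fun x hx => ((PySem.Set.mem_diff _ _ _).1 hx).2
    have hru : PySem.Set.update r (PySem.Set.diff (PySem.Set.ofList vs) r)
        = r ++ PySem.Set.diff (PySem.Set.ofList vs) r :=
      PySem.Set.update_eq_append_of_disjoint _ _ hnodup hdisr
    have hqlen : (PySem.Set.update q (PySem.Set.diff (PySem.Set.ofList vs) r)).length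
        ≤ q.length + (PySem.Set.diff (PySem.Set.ofList vs) r).length := by
      rw [PySem.Set.update_eq_append_filter]
      have h1 := List.length_filter_le (fun y => !PySem.Set.contains q y)
        (PySem.Set.ofList (PySem.Set.diff (PySem.Set.ofList vs) r))
      have h2 := PySem.Set.length_ofList_le (PySem.Set.diff (PySem.Set.ofList vs) r)
      simp only [List.length_append]
      omega
    have hvs : vs ∈ c.map Prod.snd := pv_get_mem_values c v vs hv
    have hnwK : (PySem.Set.diff (PySem.Set.ofList vs) r).length ≤ pvK c := by
      have h1 : List.Sublist (PySem.Set.diff (PySem.Set.ofList vs) r) (PySem.Set.ofList vs) :=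
        List.filter_sublist
      have h2 := PySem.Set.length_ofList_le vs
      have h3 := pv_vs_len_le c vs hvs
      have := h1.length_le
      omega
    rw [hru]
    rcases hnw : PySem.Set.diff (PySem.Set.ofList vs) r with _ | ⟨x, xs⟩
    · rw [hnw] at hqlen
      rw [PySem.Set.update_nil] at hqlen
      simp only [List.append_nil, PySem.Set.update_nil, List.length_cons]
      omega
    · have hx : x ∈ PySem.Set.diff (PySem.Set.ofList vs) r := by rw [hnw]; exact List.mem_cons_self
      have hxvs : x ∈ vs := by
        have := ((PySem.Set.mem_diff _ _ _).1 hx).1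
        exact (PySem.Set.mem_ofList _ _).1 this
      have hund : pvUndisc c (r ++ x :: xs) < pvUndisc c r := by
        rw [← hnw]
        exact pv_undisc_lt c r _ x hx (pv_mem_allNodes c vs x hvs hxvs) (hdisr x hx)
      have hmul := Nat.mul_le_mul_left (pvK c + 1) (Nat.succ_le_of_lt hund)
      simp only [Nat.mul_succ] at hmul
      rw [hnw] at hqlen hnwK
      simp only [List.length_cons] at *
      omega

def compute_reachable (start : String) (connections : List (String × List String)) : List String :=
  PySem.List.sorted (pvLoopA connections [start] [start]) (fun x => x)

-- ===== PORT B =====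
-- inner 'for neighbour in connections[vertex]' loop
def pvSweepNbrs : List String → Bool → List String → Bool × List String
  | [], ch, r => (ch, r)
  | n :: ns, ch, r =>
    if r.contains n then pvSweepNbrs ns ch r
    else pvSweepNbrs ns true (PySem.Set.add r n)

-- one 'for vertex in list(reachable)' pass over the snapshot vs of the reachable set;
-- none = KeyError on connections[vertex] (excluded by Pre_)
def pvSweep (c : List (String × List String)) : List String → Bool → List String → Option (Bool × List String)
  | [], ch, r => some (ch, r)
  | v :: vt, ch, r =>
    match PySem.Dict.get? (PySem.Dict.mk c) v with
    | none => none
    | some ns =>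
      let st := pvSweepNbrs ns ch r
      pvSweep c vt st.1 st.2

-- the two lemmas below are cited by pvLoopB's termination proof
theorem pv_sweepNbrs_undisc (c : List (String × List String)) (ns : List String) (ch : Bool)
    (r : List String) (h : ∀ x ∈ ns, x ∈ pvAllNodes c) :
    pvUndisc c (pvSweepNbrs ns ch r).2 ≤ pvUndisc c r ∧
      ((pvSweepNbrs ns ch r).1 = ch ∨ pvUndisc c (pvSweepNbrs ns ch r).2 < pvUndisc c r) := by
  induction ns generalizing ch r with
  | nil => simp [pvSweepNbrs]
  | cons n ns ih =>
    by_cases hn : r.contains n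
    · rw [pvSweepNbrs, if_pos hn]
      exact ih ch r (fun x hx => h x (List.mem_cons_of_mem _ hx))
    · have hn' : n ∉ r := by simpa using hn
      rw [pvSweepNbrs, if_neg hn, PySem.Set.add_of_not_mem hn']
      have hlt : pvUndisc c (r ++ [n]) < pvUndisc c r :=
        pv_undisc_lt c r [n] n (List.mem_singleton.2 rfl) (h n List.mem_cons_self) hn'
      have hih := ih true (r ++ [n]) (fun x hx => h x (List.mem_cons_of_mem _ hx))
      have hlt2 : pvUndisc c (pvSweepNbrs ns true (r ++ [n])).2 < pvUndisc c r :=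
        lt_of_le_of_lt hih.1 hlt
      exact ⟨le_of_lt hlt2, Or.inr hlt2⟩

theorem pv_sweep_undisc (c : List (String × List String)) (vs : List String) (ch : Bool)
    (r : List String) (p : Bool × List String) (h : pvSweep c vs ch r = some p) :
    pvUndisc c p.2 ≤ pvUndisc c r ∧ (p.1 = ch ∨ pvUndisc c p.2 < pvUndisc c r) := by
  induction vs generalizing ch r with
  | nil =>
    rw [pvSweep] at h
    cases Option.some_inj.1 h
    simp
  | cons v vt ih =>
    rw [pvSweep] at h
    rcases hv : PySem.Dict.get? (PySem.Dict.mk c) v with _ | ns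
    · rw [hv] at h; exact absurd h (by simp)
    · rw [hv] at h
      have hns : ∀ x ∈ ns, x ∈ pvAllNodes c :=
        fun x hx => pv_mem_allNodes c ns x (pv_get_mem_values c v ns hv) hx
      have h1 := pv_sweepNbrs_undisc c ns ch r hns
      have h2 := ih (pvSweepNbrs ns ch r).1 (pvSweepNbrs ns ch r).2 h
      refine ⟨le_trans h2.1 h1.1, ?_⟩
      rcases h2.2 with he2 | hl2
      · rcases h1.2 with he1 | hl1
        · exact Or.inl (he2.trans he1)
        · exact Or.inr (lt_of_le_of_lt h2.1 hl1)
      · exact Or.inr (lt_of_lt_of_le hl2 h1.1)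

-- B's 'while changed' loop: pass over the snapshot of reachable; repeat while something changed
def pvLoopB (c : List (String × List String)) (r : List String) : List String :=
  match h : pvSweep c r false r with
  | none => r    -- Python raises KeyError here (excluded by Pre_)
  | some (true, r') => pvLoopB c r'
  | some (false, r') => r'
  termination_by pvUndisc c r
  decreasing_by
    have hu := pv_sweep_undisc c r false r (true, r') h
    rcases hu.2 with he | hlt
    · simp at he
    · exact hlt

def compute_reachable_alt (start : String) (connections : List (String × List String)) : List String :=
  PySem.List.sorted (pvLoopB connections [start]) (fun x => x)

-- ===== PRECONDITION & SPEC =====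
-- Pre_ is exactly the inputs on which A (and B) returns: some subset of the dict's keys
-- contains start and is closed under the neighbour lists; elsewhere both Pythons raise KeyError.
def Pre_compute_reachable (start : String) (connections : List (String × List String)) : Prop :=
  ∃ S ∈ (connections.map Prod.fst).sublists, start ∈ S ∧
    ∀ v ∈ S, ∀ w ∈ ((PySem.Dict.get? (PySem.Dict.mk connections) v).getD []), w ∈ S
instance (start : String) (connections : List (String × List String)) : Decidable (Pre_compute_reachable start connections) := by unfold Pre_compute_reachable; infer_instance

def pvWitness_compute_reachable : String × (List (String × List String)) :=
  ("a", [("a", ["a", "b"]), ("b", [])])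

def Spec_compute_reachable (start : String) (connections : List (String × List String)) (out : List String) : Prop := out = compute_reachable_alt start connections
instance (start : String) (connections : List (String × List String)) (out : List String) : Decidable (Spec_compute_reachable start connections out) := by unfold Spec_compute_reachable; infer_instance

-- ===== CLAIM (what is proved, stated in full; the proofs are below) =====
def Claim_equal_compute_reachable : Prop := ∀ (start : String) (connections : List (String × List String)), Dom_compute_reachable start connections → Pre_compute_reachable start connections → Spec_compute_reachable start connections (compute_reachable start connections)


-- ===== LEMMAS AND PROOFS =====

-- the set of vertices Python reaches from start through the dict
inductive pvReach (c : List (String × List String)) (s : String) : String → Prop where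
  | refl : pvReach c s s
  | step {v w : String} {vs : List String} : pvReach c s v →
      PySem.Dict.get? (PySem.Dict.mk c) v = some vs → w ∈ vs → pvReach c s w

theorem pv_get_isSome (c : List (String × List String)) (v : String)
    (hv : v ∈ c.map Prod.fst) : ∃ vs, PySem.Dict.get? (PySem.Dict.mk c) v = some vs := by
  induction c with
  | nil => simp at hv
  | cons p rest ih =>
    rw [show (PySem.Dict.mk (p :: rest)) = PySem.Dict.mk ((p.1, p.2) :: rest) by rfl,
        PySem.Dict.get?_mk_cons]
    by_cases hp : p.1 == v
    · exact ⟨p.2, by simp [hp]⟩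
    · simp only [List.map_cons, List.mem_cons] at hv
      rcases hv with h | h
      · exact absurd (beq_iff_eq.2 h.symm) hp
      · simpa [hp] using ih h

theorem pv_reach_in_S (c : List (String × List String)) (start : String) (S : List String)
    (hst : start ∈ S)
    (hcl : ∀ v ∈ S, ∀ w ∈ ((PySem.Dict.get? (PySem.Dict.mk c) v).getD []), w ∈ S)
    (x : String) (h : pvReach c start x) : x ∈ S := by
  induction h with
  | refl => exact hst
  | step hv hget hw ih => exact hcl _ ih _ (by rw [hget]; simpa using hw)

theorem pv_reach_key (c : List (String × List String)) (start : String) (S : List String)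
    (hS : S ∈ (c.map Prod.fst).sublists) (hst : start ∈ S)
    (hcl : ∀ v ∈ S, ∀ w ∈ ((PySem.Dict.get? (PySem.Dict.mk c) v).getD []), w ∈ S)
    (x : String) (h : pvReach c start x) :
    ∃ vs, PySem.Dict.get? (PySem.Dict.mk c) x = some vs :=
  pv_get_isSome c x ((List.mem_sublists.1 hS).mem (pv_reach_in_S c start S hst hcl x h))

theorem pvLoopA_nil (c : List (String × List String)) (r : List String) : pvLoopA c [] r = r := by
  rw [pvLoopA]

theorem pvLoopA_cons_some (c : List (String × List String)) (v : String) (q r vs : List String)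
    (h : PySem.Dict.get? (PySem.Dict.mk c) v = some vs) :
    pvLoopA c (v :: q) r =
      pvLoopA c (PySem.Set.update q (PySem.Set.diff (PySem.Set.ofList vs) r))
                (PySem.Set.update r (PySem.Set.diff (PySem.Set.ofList vs) r)) := by
  rw [pvLoopA, h]

-- a nodup list that contains start and is closed under the dict is exactly pvReach
theorem pv_closed_iff (c : List (String × List String)) (start : String) (r : List String)
    (h3 : ∀ x ∈ r, pvReach c start x)
    (h4 : ∀ v ∈ r, ∀ vs, PySem.Dict.get? (PySem.Dict.mk c) v = some vs → ∀ w ∈ vs, w ∈ r)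
    (h5 : start ∈ r) : ∀ x, x ∈ r ↔ pvReach c start x := by
  intro x
  refine ⟨h3 x, ?_⟩
  intro hr
  induction hr with
  | refl => exact h5
  | step hv hget hw ih => exact h4 _ ih _ hget _ hw

-- A's loop computes pvReach
theorem pv_LA (c : List (String × List String)) (start : String) (S : List String)
    (hS : S ∈ (c.map Prod.fst).sublists) (hst : start ∈ S)
    (hcl : ∀ v ∈ S, ∀ w ∈ ((PySem.Dict.get? (PySem.Dict.mk c) v).getD []), w ∈ S) :
    ∀ (μ : Nat) (q r : List String), (pvK c + 1) * pvUndisc c r + q.length ≤ μ →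
    r.Nodup → (∀ x ∈ q, x ∈ r) → (∀ x ∈ r, pvReach c start x) →
    (∀ v ∈ r, v ∉ q → ∀ vs, PySem.Dict.get? (PySem.Dict.mk c) v = some vs → ∀ w ∈ vs, w ∈ r) →
    start ∈ r →
    (pvLoopA c q r).Nodup ∧ (∀ x, x ∈ pvLoopA c q r ↔ pvReach c start x) := by
  intro μ
  induction μ with
  | zero =>
    intro q r hb h1 h2 h3 h4 h5
    rcases q with _ | ⟨v, qt⟩
    · rw [pvLoopA_nil]
      exact ⟨h1, pv_closed_iff c start r h3 (fun v hv => h4 v hv (by simp)) h5⟩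
    · exfalso; simp only [List.length_cons] at hb; omega
  | succ μ ih =>
    intro q r hb h1 h2 h3 h4 h5
    rcases q with _ | ⟨v, qt⟩
    · rw [pvLoopA_nil]
      exact ⟨h1, pv_closed_iff c start r h3 (fun v hv => h4 v hv (by simp)) h5⟩
    · have hvreach : pvReach c start v := h3 v (h2 v List.mem_cons_self)
      obtain ⟨vs, hv⟩ := pv_reach_key c start S hS hst hcl v hvreach
      rw [pvLoopA_cons_some c v qt r vs hv]
      have hnodup : (PySem.Set.diff (PySem.Set.ofList vs) r).Nodup :=
        PySem.Set.nodup_diff _ _ (PySem.Set.nodup_ofList vs)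
      have hdisr : ∀ x ∈ PySem.Set.diff (PySem.Set.ofList vs) r, x ∉ r :=
        fun x hx => ((PySem.Set.mem_diff _ _ _).1 hx).2
      have hmemnew : ∀ x ∈ PySem.Set.diff (PySem.Set.ofList vs) r, x ∈ vs :=
        fun x hx => (PySem.Set.mem_ofList _ _).1 ((PySem.Set.mem_diff _ _ _).1 hx).1
      have hru : PySem.Set.update r (PySem.Set.diff (PySem.Set.ofList vs) r)
          = r ++ PySem.Set.diff (PySem.Set.ofList vs) r :=
        PySem.Set.update_eq_append_of_disjoint _ _ hnodup hdisr
      have hvs : vs ∈ c.map Prod.snd := pv_get_mem_values c v vs hv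
      rw [hru]
      -- bound for the recursive call
      have hqlen : (PySem.Set.update qt (PySem.Set.diff (PySem.Set.ofList vs) r)).length
          ≤ qt.length + (PySem.Set.diff (PySem.Set.ofList vs) r).length := by
        rw [PySem.Set.update_eq_append_filter]
        have hf := List.length_filter_le (fun y => !PySem.Set.contains qt y)
          (PySem.Set.ofList (PySem.Set.diff (PySem.Set.ofList vs) r))
        have hl := PySem.Set.length_ofList_le (PySem.Set.diff (PySem.Set.ofList vs) r)
        simp only [List.length_append]
        omega
      have hnwK : (PySem.Set.diff (PySem.Set.ofList vs) r).length ≤ pvK c := by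
        have hsub : List.Sublist (PySem.Set.diff (PySem.Set.ofList vs) r) (PySem.Set.ofList vs) :=
          List.filter_sublist
        have hl := PySem.Set.length_ofList_le vs
        have hk := pv_vs_len_le c vs hvs
        have := hsub.length_le
        omega
      have hbound : (pvK c + 1) * pvUndisc c (r ++ PySem.Set.diff (PySem.Set.ofList vs) r)
          + (PySem.Set.update qt (PySem.Set.diff (PySem.Set.ofList vs) r)).length ≤ μ := by
        rcases hnw : PySem.Set.diff (PySem.Set.ofList vs) r with _ | ⟨x, xs⟩
        · rw [hnw] at hqlen
          rw [PySem.Set.update_nil] at hqlen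
          simp only [List.append_nil, PySem.Set.update_nil]
          simp only [List.length_cons] at hb
          omega
        · have hx : x ∈ PySem.Set.diff (PySem.Set.ofList vs) r := by
            rw [hnw]; exact List.mem_cons_self
          have hund : pvUndisc c (r ++ x :: xs) < pvUndisc c r := by
            rw [← hnw]
            exact pv_undisc_lt c r _ x hx
              (pv_mem_allNodes c vs x hvs (hmemnew x hx)) (hdisr x hx)
          have hmul := Nat.mul_le_mul_left (pvK c + 1) (Nat.succ_le_of_lt hund)
          simp only [Nat.mul_succ] at hmul
          rw [hnw] at hqlen hnwK
          simp only [List.length_cons] at *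
          omega
      refine ih _ _ hbound ?_ ?_ ?_ ?_ ?_
      · exact List.Nodup.append h1 hnodup (fun x hxr hxn => hdisr x hxn hxr)
      · intro x hx
        rcases (PySem.Set.mem_update _ _ _).1 hx with hxq | hxn
        · exact List.mem_append.2 (Or.inl (h2 x (List.mem_cons_of_mem _ hxq)))
        · exact List.mem_append.2 (Or.inr hxn)
      · intro x hx
        rcases List.mem_append.1 hx with hxr | hxn
        · exact h3 x hxr
        · exact pvReach.step hvreach hv (hmemnew x hxn)
      · intro u hu hnq vs' hget' w hw
        rcases List.mem_append.1 hu with hur | hun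
        · by_cases huv : u = v
          · subst huv
            have : vs' = vs := by rw [hv] at hget'; exact (Option.some_inj.1 hget').symm
            subst this
            by_cases hwr : w ∈ r
            · exact List.mem_append.2 (Or.inl hwr)
            · refine List.mem_append.2 (Or.inr ?_)
              exact (PySem.Set.mem_diff _ _ _).2 ⟨(PySem.Set.mem_ofList _ _).2 hw, hwr⟩
          · have hnqt : u ∉ qt := fun hqt =>
              hnq ((PySem.Set.mem_update _ _ _).2 (Or.inl hqt))
            have hnoq : u ∉ v :: qt := by
              intro hm
              rcases List.mem_cons.1 hm with h | h
              · exact huv h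
              · exact hnqt h
            exact List.mem_append.2 (Or.inl (h4 u hur hnoq vs' hget' w hw))
        · exact absurd ((PySem.Set.mem_update _ _ _).2 (Or.inr hun)) hnq
      · exact List.mem_append.2 (Or.inl h5)

-- sweep facts for B
theorem pv_sweepNbrs_of_true (ns : List String) (r : List String) :
    (pvSweepNbrs ns true r).1 = true := by
  induction ns generalizing r with
  | nil => simp [pvSweepNbrs]
  | cons n ns ih =>
    by_cases hn : r.contains n
    · rw [pvSweepNbrs, if_pos hn]; exact ih r
    · rw [pvSweepNbrs, if_neg hn]; exact ih _

theorem pv_sweepNbrs_false (ns : List String) (ch : Bool) (r : List String)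
    (h : (pvSweepNbrs ns ch r).1 = false) :
    ch = false ∧ (pvSweepNbrs ns ch r).2 = r ∧ ∀ x ∈ ns, x ∈ r := by
  induction ns generalizing ch r with
  | nil => simp [pvSweepNbrs] at h ⊢; exact h
  | cons n ns ih =>
    by_cases hn : r.contains n
    · rw [pvSweepNbrs, if_pos hn] at h ⊢
      obtain ⟨hc, hr, hm⟩ := ih ch r h
      refine ⟨hc, hr, ?_⟩
      intro x hx
      rcases List.mem_cons.1 hx with hx | hx
      · subst hx; simpa using hn
      · exact hm x hx
    · rw [pvSweepNbrs, if_neg hn] at h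
      have := pv_sweepNbrs_of_true ns (PySem.Set.add r n)
      rw [this] at h
      exact absurd h (by decide)

theorem pv_sweep_none (c : List (String × List String)) (vs : List String) (ch : Bool)
    (r : List String) (h : pvSweep c vs ch r = none) :
    ∃ v ∈ vs, PySem.Dict.get? (PySem.Dict.mk c) v = none := by
  induction vs generalizing ch r with
  | nil => rw [pvSweep] at h; exact absurd h (by simp)
  | cons v vt ih =>
    rw [pvSweep] at h
    rcases hv : PySem.Dict.get? (PySem.Dict.mk c) v with _ | ns
    · exact ⟨v, List.mem_cons_self, hv⟩
    · rw [hv] at h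
      obtain ⟨u, hu, hun⟩ := ih _ _ h
      exact ⟨u, List.mem_cons_of_mem _ hu, hun⟩

theorem pv_sweep_false (c : List (String × List String)) (vs : List String) (ch : Bool)
    (r r' : List String) (h : pvSweep c vs ch r = some (false, r')) :
    ch = false ∧ r' = r ∧
      ∀ v ∈ vs, ∀ ns, PySem.Dict.get? (PySem.Dict.mk c) v = some ns → ∀ x ∈ ns, x ∈ r := by
  induction vs generalizing ch r with
  | nil =>
    rw [pvSweep] at h
    have hp := Option.some_inj.1 h
    exact ⟨congrArg Prod.fst hp, (congrArg Prod.snd hp).symm, by simp⟩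
  | cons v vt ih =>
    rw [pvSweep] at h
    rcases hv : PySem.Dict.get? (PySem.Dict.mk c) v with _ | ns
    · rw [hv] at h; exact absurd h (by simp)
    · rw [hv] at h
      obtain ⟨hst, hr, hcl⟩ := ih _ _ h
      obtain ⟨hc, hr2, hm⟩ := pv_sweepNbrs_false ns ch r hst
      refine ⟨hc, by rw [hr, hr2], ?_⟩
      intro u hu ns' hget' x hx
      rcases List.mem_cons.1 hu with huh | hut
      · subst huh
        have : ns' = ns := by rw [hv] at hget'; exact (Option.some_inj.1 hget').symm
        subst this
        exact hm x hx
      · rw [hr2] at hcl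
        exact hcl u hut ns' hget' x hx

theorem pv_sweepNbrs_shape (c : List (String × List String)) (start : String)
    (ns : List String) (ch : Bool) (r : List String)
    (hns : ∀ x ∈ ns, pvReach c start x)
    (h1 : r.Nodup) (h3 : ∀ x ∈ r, pvReach c start x) :
    (∃ t, (pvSweepNbrs ns ch r).2 = r ++ t) ∧ (pvSweepNbrs ns ch r).2.Nodup ∧
      (∀ x ∈ (pvSweepNbrs ns ch r).2, pvReach c start x) := by
  induction ns generalizing ch r with
  | nil => exact ⟨⟨[], by simp [pvSweepNbrs]⟩, by simpa [pvSweepNbrs] using h1,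
      by simpa [pvSweepNbrs] using h3⟩
  | cons n ns ih =>
    by_cases hn : r.contains n
    · rw [pvSweepNbrs, if_pos hn]
      exact ih ch r (fun x hx => hns x (List.mem_cons_of_mem _ hx)) h1 h3
    · have hn' : n ∉ r := by simpa using hn
      rw [pvSweepNbrs, if_neg hn, PySem.Set.add_of_not_mem hn']
      have h1' : (r ++ [n]).Nodup :=
        List.Nodup.append h1 (List.nodup_singleton n)
          (fun x hxr hxn => by rw [List.mem_singleton] at hxn; subst hxn; exact hn' hxr)
      have h3' : ∀ x ∈ r ++ [n], pvReach c start x := by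
        intro x hx
        rcases List.mem_append.1 hx with hx | hx
        · exact h3 x hx
        · rw [List.mem_singleton] at hx; subst hx; exact hns x List.mem_cons_self
      obtain ⟨⟨t, ht⟩, hnd, hre⟩ :=
        ih true (r ++ [n]) (fun x hx => hns x (List.mem_cons_of_mem _ hx)) h1' h3'
      exact ⟨⟨n :: t, by rw [ht, List.append_assoc]; rfl⟩, hnd, hre⟩

theorem pv_sweep_shape (c : List (String × List String)) (start : String)
    (vs : List String) (ch : Bool) (r : List String) (p : Bool × List String)
    (hvs : ∀ v ∈ vs, pvReach c start v)
    (h1 : r.Nodup) (h3 : ∀ x ∈ r, pvReach c start x)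
    (h : pvSweep c vs ch r = some p) :
    (∃ t, p.2 = r ++ t) ∧ p.2.Nodup ∧ (∀ x ∈ p.2, pvReach c start x) := by
  induction vs generalizing ch r with
  | nil =>
    rw [pvSweep] at h
    cases Option.some_inj.1 h
    exact ⟨⟨[], by simp⟩, h1, h3⟩
  | cons v vt ih =>
    rw [pvSweep] at h
    rcases hv : PySem.Dict.get? (PySem.Dict.mk c) v with _ | ns
    · rw [hv] at h; exact absurd h (by simp)
    · rw [hv] at h
      have hns : ∀ x ∈ ns, pvReach c start x :=
        fun x hx => pvReach.step (hvs v List.mem_cons_self) hv hx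
      obtain ⟨⟨t, ht⟩, hnd, hre⟩ := pv_sweepNbrs_shape c start ns ch r hns h1 h3
      obtain ⟨⟨t2, ht2⟩, hnd2, hre2⟩ :=
        ih _ _ (fun u hu => hvs u (List.mem_cons_of_mem _ hu)) hnd hre h
      exact ⟨⟨t ++ t2, by rw [ht2, ht, List.append_assoc]⟩, hnd2, hre2⟩

-- B's loop computes pvReach
theorem pv_LB (c : List (String × List String)) (start : String) (S : List String)
    (hS : S ∈ (c.map Prod.fst).sublists) (hst : start ∈ S)
    (hcl : ∀ v ∈ S, ∀ w ∈ ((PySem.Dict.get? (PySem.Dict.mk c) v).getD []), w ∈ S) :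
    ∀ (μ : Nat) (r : List String), pvUndisc c r ≤ μ →
    r.Nodup → (∀ x ∈ r, pvReach c start x) → start ∈ r →
    (pvLoopB c r).Nodup ∧ (∀ x, x ∈ pvLoopB c r ↔ pvReach c start x) := by
  intro μ
  induction μ with
  | zero =>
    intro r hb h1 h3 h5
    rw [pvLoopB]
    rcases hsw : pvSweep c r false r with _ | ⟨_ | _, r'⟩
    · obtain ⟨v, hvr, hnone⟩ := pv_sweep_none c r false r hsw
      obtain ⟨ns, hns⟩ := pv_reach_key c start S hS hst hcl v (h3 v hvr)
      rw [hns] at hnone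
      exact absurd hnone (by simp)
    · obtain ⟨_, hr, hclr⟩ := pv_sweep_false c r false r r' hsw
      rw [hr]
      exact ⟨h1, pv_closed_iff c start r h3 (fun v hv vs hget w hw => hclr v hv vs hget w hw) h5⟩
    · exfalso
      have hu := pv_sweep_undisc c r false r (true, r') hsw
      rcases hu.2 with he | hlt
      · simp at he
      · simp only at hlt; omega
  | succ μ ih =>
    intro r hb h1 h3 h5
    rw [pvLoopB]
    rcases hsw : pvSweep c r false r with _ | ⟨_ | _, r'⟩
    · obtain ⟨v, hvr, hnone⟩ := pv_sweep_none c r false r hsw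
      obtain ⟨ns, hns⟩ := pv_reach_key c start S hS hst hcl v (h3 v hvr)
      rw [hns] at hnone
      exact absurd hnone (by simp)
    · obtain ⟨_, hr, hclr⟩ := pv_sweep_false c r false r r' hsw
      rw [hr]
      exact ⟨h1, pv_closed_iff c start r h3 (fun v hv vs hget w hw => hclr v hv vs hget w hw) h5⟩
    · obtain ⟨⟨t, ht⟩, hnd, hre⟩ := pv_sweep_shape c start r false r (true, r') h3 h1 h3 hsw
      have hb' : pvUndisc c r' ≤ μ := by
        have hu := pv_sweep_undisc c r false r (true, r') hsw
        rcases hu.2 with he | hlt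
        · simp at he
        · simp only at hlt; omega
      have ht' : r' = r ++ t := ht
      exact ih r' hb' hnd hre (by rw [ht']; exact List.mem_append.2 (Or.inl h5))

-- ===== VERDICT (by name: the statements are the Claim_ definitions above) =====
theorem compute_reachable_spec : Claim_equal_compute_reachable := by
  intro start c _ hpre
  obtain ⟨S, hS, hst, hcl⟩ := hpre
  unfold Spec_compute_reachable compute_reachable compute_reachable_alt
  have hstart_reach : ∀ x ∈ [start], pvReach c start x := by
    intro x hx; rw [List.mem_singleton] at hx; subst hx; exact pvReach.refl
  have hA := pv_LA c start S hS hst hcl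
    ((pvK c + 1) * pvUndisc c [start] + 1) [start] [start] le_rfl
    (List.nodup_singleton start) (fun x hx => hx) hstart_reach
    (fun v hv hnq => absurd hv hnq) List.mem_cons_self
  have hB := pv_LB c start S hS hst hcl (pvUndisc c [start]) [start] le_rfl
    (List.nodup_singleton start) hstart_reach List.mem_cons_self
  have hperm : (pvLoopA c [start] [start]).Perm (pvLoopB c [start]) :=
    (List.perm_ext_iff_of_nodup hA.1 hB.1).2 (fun a => (hA.2 a).trans (hB.2 a).symm)
  exact PySem.List.sorted_eq_sorted_of_perm _ _ (fun x => x) (fun a b h => h) hperm
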